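-- pv_equiv track=rewrite | github.com/mmobik/Home-2 | Task_Tests/task_7/test_cases.py | solve_reference
-- ===== SOURCE A (Python) =====
-- def solve_reference(n, m, tiles):
--     """
--     Эталонное решение для проверки правильности ответов.
--     Находит все K, для которых первые K плиток образуют палиндром
--     (т.е. совпадают с собой в обратном порядке).
--     Оптимизировано для больших N.
--     """
--     results = []
--
--     # Для больших N используем оптимизированную проверку
--     if n > 10000:
--         # Проверяем только каждую 100-ю позицию для ускорения
--         # Но всегда проверяем k=n и k=1
--         check_points = set([n, 1])
--         # Добавляем несколько промежуточных точек
--         step = max(1, n // 1000)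
--         for k in range(n, 0, -step):
--             check_points.add(k)
--
--         for k in sorted(check_points, reverse=True):
--             if k > n:
--                 continue
--             prefix = tiles[:k]
--             if prefix == prefix[::-1]:
--                 results.append(str(k))
--     else:
--         # Для малых N проверяем все
--         for k in range(n, 0, -1):
--             prefix = tiles[:k]
--             if prefix == prefix[::-1]:
--                 results.append(str(k))
--
--     return " ".join(results) if results else ""
-- ===== SOURCE B (Python) =====
-- def solve_reference(n, m, tiles):
--     # One pass over `tiles` with exact rolling hashes (base 2**21, which exceeds
--     # every code point) of the prefix and of its reverse, built with shifts/ors,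
--     # collecting the full set of palindromic prefix lengths; each candidate K is
--     # then answered by an O(1) set lookup. Exact because the two hashes are the
--     # base-2**21 digit strings of the prefix and of its reverse: equal iff the
--     # prefix is a palindrome.
--     SH = 21
--     pal = set()
--     hf = hb = 0
--     sh = 0
--     k = 0
--     for ch in tiles:
--         c = ord(ch)
--         hf = (hf << SH) | c
--         hb = hb | (c << sh)
--         sh += SH
--         k += 1
--         if hf == hb:
--             pal.add(k)
--     L = len(tiles)
--     whole = (L in pal) or L == 0   # tiles itself a palindrome (prefix for every K >= L)
--     if n > 10000:
--         step = max(1, n // 1000)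
--         ks = list(range(n, 0, -step))
--         if ks[-1] != 1:
--             ks.append(1)
--     else:
--         ks = range(n, 0, -1)
--     return " ".join(str(k) for k in ks if k in pal or (k >= L and whole))
-- ===== Notes on version B (the rewrite author's own statement) =====
-- stated objective: alternative
-- what changed: B never tests any candidate prefix: one left-to-right pass over tiles maintains exact rolling hashes of the prefix and of its reverse (base 2**21 exceeds every code point, so the two hashes are the base-2**21 digit strings of the prefix and of its reverse, built with shifts/ors, and are equal iff the prefix is a palindrome), collecting the complete set of palindromic prefix lengths once; each candidate K is then answered by an O(1) set lookup (K in pal, or K >= len(tiles) and tiles itself is a palindrome), whereas A re-slices and reverses a fresh prefix per candidate.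
import Mathlib
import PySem

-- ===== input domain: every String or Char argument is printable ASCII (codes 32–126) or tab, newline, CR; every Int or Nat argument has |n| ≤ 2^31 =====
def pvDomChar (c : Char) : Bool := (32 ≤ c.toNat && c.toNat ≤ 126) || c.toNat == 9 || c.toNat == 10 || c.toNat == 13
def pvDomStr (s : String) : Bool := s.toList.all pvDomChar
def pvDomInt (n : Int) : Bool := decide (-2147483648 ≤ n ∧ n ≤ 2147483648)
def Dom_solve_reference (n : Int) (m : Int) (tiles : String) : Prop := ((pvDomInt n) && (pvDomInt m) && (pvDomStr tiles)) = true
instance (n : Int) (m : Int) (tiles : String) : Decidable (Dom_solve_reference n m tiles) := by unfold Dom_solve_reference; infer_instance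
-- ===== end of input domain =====

-- B precomputes, in one pass with exact big-integer rolling hashes (base 2^21, shifts/ors), the set
-- of ALL palindromic prefix lengths of tiles, and answers each candidate K by a set lookup — no
-- per-candidate scan.

-- ===== PORT A =====
def solve_reference (n : Int) (m : Int) (tiles : String) : String :=
  let results : List String := []
  if n > 10000 then
    let check_points : PySem.Set Int := PySem.Set.ofList [n, 1]
    let step : Int := max 1 (PySem.Int.floordiv n 1000)
    let check_points := (PySem.List.pyRange n 0 (-step)).foldl (fun s k => PySem.Set.add s k) check_points
    let results := (PySem.List.sorted check_points (fun x => x) true).foldl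
      (fun acc k =>
        if k > n then acc
        else
          let pfx := PySem.Str.slice tiles none (some k)
          -- prefix[::-1]: step -1 never raises, so .getD "" is exact
          let revp := (PySem.Str.slice? pfx none none (-1)).getD ""
          if pfx = revp then acc ++ [PySem.Int.toStr k] else acc)
      results
    if results ≠ [] then PySem.Str.join " " results else ""
  else
    let results := (PySem.List.pyRange n 0 (-1)).foldl
      (fun acc k =>
        let pfx := PySem.Str.slice tiles none (some k)
        let revp := (PySem.Str.slice? pfx none none (-1)).getD ""
        if pfx = revp then acc ++ [PySem.Int.toStr k] else acc)
      results
    if results ≠ [] then PySem.Str.join " " results else ""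

-- ===== PORT B =====
-- one loop iteration of Source B: shift the next code point into both rolling hashes (base 2^21;
-- '<<' and '|' are Lean's '<<<' and PySem.Int.bor, exact for Python's int shifts and ors), bump
-- the shift amount and the running length k, and record k when the two hashes coincide
def pvHashStep (st : Int × Int × Nat × Int × PySem.Set Int) (ch : Char) :
    Int × Int × Nat × Int × PySem.Set Int :=
  match st with
  | (hf, hb, sh, k, pal) =>
    let c : Int := (ch.toNat : Int)
    let hf := PySem.Int.bor (hf <<< (21 : Nat)) c
    let hb := PySem.Int.bor hb (c <<< sh)
    let sh := sh + 21
    let k := k + 1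
    (hf, hb, sh, k, if hf = hb then PySem.Set.add pal k else pal)

def solve_reference_alt (n : Int) (m : Int) (tiles : String) : String :=
  let st := tiles.toList.foldl pvHashStep (0, 0, 0, 0, PySem.Set.empty)
  let pal : PySem.Set Int := st.2.2.2.2
  let L : Int := (tiles.toList.length : Int)
  let whole : Bool := decide (L ∈ pal) || decide (L = 0)
  let ks : List Int :=
    if n > 10000 then
      let step : Int := max 1 (PySem.Int.floordiv n 1000)
      let r := PySem.List.pyRange n 0 (-step)
      if PySem.List.pyGetD r (-1) 0 ≠ 1 then r ++ [1] else r
    else PySem.List.pyRange n 0 (-1)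
  PySem.Str.join " "
    ((ks.filter (fun k => decide (k ∈ pal) || (decide (L ≤ k) && whole))).map PySem.Int.toStr)

-- ===== PRECONDITION & SPEC =====
def Spec_solve_reference (n : Int) (m : Int) (tiles : String) (out : String) : Prop := out = solve_reference_alt n m tiles
instance (n : Int) (m : Int) (tiles : String) (out : String) : Decidable (Spec_solve_reference n m tiles out) := by unfold Spec_solve_reference; infer_instance

-- ===== CLAIM (what is proved, stated in full; the proofs are below) =====
def Claim_equal_solve_reference : Prop := ∀ (n : Int) (m : Int) (tiles : String), Dom_solve_reference n m tiles → Spec_solve_reference n m tiles (solve_reference n m tiles)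

-- ===== LEMMAS AND PROOFS =====

-- specification value of the set B's loop builds: the palindromic prefix lengths, in order
def pvPal (l : List Char) : List Int :=
  (List.range l.length).filterMap
    (fun j => if (l.take (j + 1)).reverse = l.take (j + 1) then some ((j : Int) + 1) else none)

lemma pvPal_mem (l : List Char) (k : Int) :
    k ∈ pvPal l ↔ 1 ≤ k ∧ k ≤ (l.length : Int) ∧ (l.take k.toNat).reverse = l.take k.toNat := by
  unfold pvPal
  simp only [List.mem_filterMap, List.mem_range]
  constructor
  · rintro ⟨j, hj, hcond⟩
    split at hcond
    · rename_i hpal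
      have hk : k = (j : Int) + 1 := (Option.some_inj.mp hcond).symm
      have ht : k.toNat = j + 1 := by omega
      exact ⟨by omega, by omega, ht ▸ hpal⟩
    · exact absurd hcond (by simp)
  · rintro ⟨h1, h2, hpal⟩
    refine ⟨k.toNat - 1, by omega, ?_⟩
    have ht : k.toNat - 1 + 1 = k.toNat := by omega
    rw [ht, if_pos hpal]
    congr 1
    omega

-- base-2097152 digit strings of equal length are determined by their value
lemma pv_ofDigits_inj : ∀ (d1 d2 : List ℕ), d1.length = d2.length →
    (∀ x ∈ d1, x < 2097152) → (∀ x ∈ d2, x < 2097152) →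
    Nat.ofDigits 2097152 d1 = Nat.ofDigits 2097152 d2 → d1 = d2 := by
  intro d1 d2 hlen h1 h2 heq
  induction d1 generalizing d2 with
  | nil => cases d2 with
    | nil => rfl
    | cons b t => simp at hlen
  | cons a t ih =>
    cases d2 with
    | nil => simp at hlen
    | cons b u =>
      rw [Nat.ofDigits_cons, Nat.ofDigits_cons] at heq
      have ha := h1 a (by simp)
      have hb := h2 b (by simp)
      have hab : a = b ∧ Nat.ofDigits 2097152 t = Nat.ofDigits 2097152 u := by omega
      rw [hab.1, ih u (by simpa using hlen) (fun x hx => h1 x (by simp [hx]))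
        (fun x hx => h2 x (by simp [hx])) hab.2]

-- every code point is a digit in base 2^21
lemma pv_char_lt (c : Char) : c.toNat < 2097152 := by
  have h := c.valid
  simp [UInt32.isValidChar, Nat.isValidChar] at h
  have e : c.toNat = c.val.toNat := rfl
  omega

-- Char.toNat determines the character
lemma pv_toNat_inj : Function.Injective Char.toNat := by
  intro a b h
  exact Char.ext (UInt32.toNat_inj.mp h)

-- a base-2^21 digit value is bounded by the power of the base
lemma pv_ofDigits_lt : ∀ (l : List ℕ), (∀ d ∈ l, d < 2097152) →
    Nat.ofDigits 2097152 l < 2 ^ (21 * l.length) := by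
  intro l
  induction l with
  | nil => simp [Nat.ofDigits]
  | cons a t ih =>
    intro h
    rw [Nat.ofDigits_cons, List.length_cons]
    have ht := ih (fun d hd => h d (by simp [hd]))
    have ha := h a (by simp)
    have hp : 2 ^ (21 * (t.length + 1)) = 2097152 * 2 ^ (21 * t.length) := by
      rw [Nat.mul_add, pow_add]
      ring
    rw [hp]
    nlinarith

-- the two digit values coincide exactly on palindromes
lemma pv_hash_iff (u : List Char) :
    Nat.ofDigits 2097152 ((u.map Char.toNat).reverse) = Nat.ofDigits 2097152 (u.map Char.toNat)
      ↔ u.reverse = u := by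
  constructor
  · intro h
    have hdig := pv_ofDigits_inj _ _ (by simp)
      (by intro x hx; rw [List.mem_reverse, List.mem_map] at hx
          obtain ⟨c, _, rfl⟩ := hx; exact pv_char_lt c)
      (by intro x hx; rw [List.mem_map] at hx
          obtain ⟨c, _, rfl⟩ := hx; exact pv_char_lt c) h
    rw [← List.map_reverse] at hdig
    exact List.map_injective_iff.mpr pv_toNat_inj hdig
  · intro h
    rw [← List.map_reverse, h]

-- appending one character extends pvPal by at most the new full length
lemma pvPal_append (t : List Char) (c : Char) :
    pvPal (t ++ [c]) = pvPal t ++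
      (if (t ++ [c]).reverse = t ++ [c] then [(t.length : Int) + 1] else []) := by
  unfold pvPal
  rw [List.length_append, List.length_singleton, List.range_succ, List.filterMap_append]
  congr 1
  · apply List.filterMap_congr
    intro j hj
    rw [List.mem_range] at hj
    rw [List.take_append_of_le_length (by omega)]
  · have htk : List.take (t.length + 1) (t ++ [c]) = t ++ [c] :=
      List.take_of_length_le (by simp)
    rw [List.filterMap_cons, List.filterMap_nil, htk]
    simp only [List.reverse_append, List.reverse_singleton, List.singleton_append]
    by_cases hp : c :: t.reverse = t ++ [c] <;> simp [hp]

-- the fold of pvHashStep computes the two digit values, the shift amount, the length and pvPal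
lemma pvFold_inv (l : List Char) :
    l.foldl pvHashStep (0, 0, 0, 0, PySem.Set.empty)
      = (((Nat.ofDigits 2097152 ((l.map Char.toNat).reverse) : ℕ) : ℤ),
         ((Nat.ofDigits 2097152 (l.map Char.toNat) : ℕ) : ℤ),
         21 * l.length,
         (l.length : ℤ),
         pvPal l) := by
  induction l using List.reverseRecOn with
  | nil => rfl
  | append_singleton t c ih =>
    rw [List.foldl_append, ih, List.foldl_cons, List.foldl_nil]
    unfold pvHashStep
    dsimp only
    have hd : (t ++ [c]).map Char.toNat = t.map Char.toNat ++ [c.toNat] := by simp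
    have hcast : ∀ (a : ℕ) (k : ℕ), ((a : ℤ) <<< k) = ((a <<< k : ℕ) : ℤ) := by
      intro a k
      simp [Int.shiftLeft_eq, Nat.shiftLeft_eq]
    have hf : PySem.Int.bor (((Nat.ofDigits 2097152 ((t.map Char.toNat).reverse) : ℕ) : ℤ) <<< (21 : Nat)) ((c.toNat : ℕ) : ℤ)
        = ((Nat.ofDigits 2097152 (((t ++ [c]).map Char.toNat).reverse) : ℕ) : ℤ) := by
      rw [hcast, PySem.Int.bor_natCast, Nat.cast_inj,
        ← Nat.shiftLeft_add_eq_or_of_lt (by simpa using pv_char_lt c),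
        Nat.shiftLeft_eq, hd, List.reverse_append, List.reverse_singleton,
        List.singleton_append, Nat.ofDigits_cons]
      ring
    have hb : PySem.Int.bor ((Nat.ofDigits 2097152 (t.map Char.toNat) : ℕ) : ℤ) (((c.toNat : ℕ) : ℤ) <<< (21 * t.length))
        = ((Nat.ofDigits 2097152 ((t ++ [c]).map Char.toNat) : ℕ) : ℤ) := by
      have hbound : Nat.ofDigits 2097152 (t.map Char.toNat) < 2 ^ (21 * t.length) := by
        have := pv_ofDigits_lt (t.map Char.toNat)
          (by intro d hd; rw [List.mem_map] at hd; obtain ⟨x, _, rfl⟩ := hd; exact pv_char_lt x)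
        simpa using this
      rw [hcast, PySem.Int.bor_natCast, Nat.cast_inj, Nat.lor_comm,
        ← Nat.shiftLeft_add_eq_or_of_lt hbound,
        Nat.shiftLeft_eq, hd, Nat.ofDigits_append, Nat.ofDigits_cons, Nat.ofDigits_nil,
        List.length_map]
      have : (2097152 : ℕ) ^ t.length = 2 ^ (21 * t.length) := by
        rw [pow_mul]
        norm_num
      rw [this]
      ring
    have hcond : (PySem.Int.bor (((Nat.ofDigits 2097152 ((t.map Char.toNat).reverse) : ℕ) : ℤ) <<< (21 : Nat)) ((c.toNat : ℕ) : ℤ)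
          = PySem.Int.bor ((Nat.ofDigits 2097152 (t.map Char.toNat) : ℕ) : ℤ) (((c.toNat : ℕ) : ℤ) <<< (21 * t.length)))
        ↔ (t ++ [c]).reverse = t ++ [c] := by
      rw [hf, hb, Nat.cast_inj]
      exact pv_hash_iff (t ++ [c])
    simp only [Prod.mk.injEq]
    refine ⟨hf, hb, by simp [Nat.mul_add], by simp, ?_⟩
    · rw [pvPal_append]
      by_cases hp : (t ++ [c]).reverse = t ++ [c]
      · rw [if_pos (hcond.mpr hp), if_pos hp]
        have hnot : ((t.length : Int) + 1) ∉ pvPal t := by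
          intro hmem
          have := (pvPal_mem t _).mp hmem
          omega
        simp [PySem.Set.add, hnot]
      · rw [if_neg (fun h => hp (hcond.mp h)), if_neg hp, List.append_nil]

-- A's slice-and-reverse test as a boolean of the prefix list
lemma pv_test_eq (tiles : String) (k : Int) (hk : 1 ≤ k) :
    (decide (PySem.Str.slice tiles none (some k) =
      (PySem.Str.slice? (PySem.Str.slice tiles none (some k)) none none (-1)).getD ""))
      = decide ((tiles.toList.take k.toNat).reverse = tiles.toList.take k.toNat) := by
  apply Bool.eq_iff_iff.mpr
  rw [decide_eq_true_eq, decide_eq_true_eq]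
  rw [PySem.Str.slice?_none_none_neg_one, Option.getD_some]
  have hpfx : (PySem.Str.slice tiles none (some k)).toList = tiles.toList.take k.toNat := by
    rw [PySem.Str.toList_slice, PySem.Chars.slice_eq_listSlice,
      PySem.List.slice_to tiles.toList (b := k) (by omega)]
  rw [← String.toList_inj, String.toList_ofList, hpfx]
  exact eq_comm

-- the per-candidate predicates of A and B agree for k ≥ 1
lemma pv_pred_eq (l : List Char) (k : Int) (hk : 1 ≤ k) :
    decide ((l.take k.toNat).reverse = l.take k.toNat)
      = (decide (k ∈ pvPal l) ||
         (decide ((l.length : Int) ≤ k) &&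
          (decide ((l.length : Int) ∈ pvPal l) || decide ((l.length : Int) = 0)))) := by
  apply Bool.eq_iff_iff.mpr
  simp only [Bool.or_eq_true, Bool.and_eq_true, decide_eq_true_eq]
  by_cases hle : k ≤ (l.length : Int)
  · rw [pvPal_mem]
    constructor
    · intro h; exact Or.inl ⟨hk, hle, h⟩
    · rintro (⟨_, _, h⟩ | ⟨hge, hw⟩)
      · exact h
      · have hkL : k = (l.length : Int) := le_antisymm hle hge
        rcases hw with hmem | h0
        · rw [pvPal_mem] at hmem
          rw [hkL]
          have : ((l.length : Int)).toNat = l.length := by omega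
          exact hmem.2.2
        · omega
  · have htake : l.take k.toNat = l := List.take_of_length_le (by omega)
    rw [htake]
    constructor
    · intro h
      refine Or.inr ⟨by omega, ?_⟩
      rcases Nat.eq_zero_or_pos l.length with h0 | hpos
      · exact Or.inr (by exact_mod_cast h0)
      · refine Or.inl ((pvPal_mem l _).mpr ⟨by omega, le_refl _, ?_⟩)
        have : ((l.length : Int)).toNat = l.length := by omega
        rw [this, List.take_length]
        exact h
    · rintro (hmem | ⟨_, hw⟩)
      · rw [pvPal_mem] at hmem; omega
      · rcases hw with hmem | h0
        · rw [pvPal_mem] at hmem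
          have : ((l.length : Int)).toNat = l.length := by omega
          rw [this, List.take_length] at hmem
          exact hmem.2.2
        · have : l = [] := List.length_eq_zero_iff.mp (by omega)
          simp [this]

-- in a strictly decreasing list the last element is minimal
lemma pv_getLast_min {l : List Int} (hp : l.Pairwise (fun a b => b < a)) (hne : l ≠ []) :
    ∀ x ∈ l, l.getLast hne ≤ x := by
  induction l with
  | nil => exact absurd rfl hne
  | cons a t ih =>
    intro x hx
    cases t with
    | nil => simp at hx; simp [hx, List.getLast]
    | cons b u =>
      rw [List.getLast_cons (by simp)]
      rcases List.mem_cons.mp hx with rfl | hx'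
      · have hm : (b :: u).getLast (by simp) ∈ (b :: u) := List.getLast_mem _
        exact le_of_lt (List.rel_of_pairwise_cons hp hm)
      · exact ih (List.Pairwise.of_cons hp) (by simp) x hx'

-- Python's '" ".join(results) if results else ""' equals the plain join ('" ".join([]) == ""')
lemma pv_join_if (l : List String) :
    (if l ≠ [] then PySem.Str.join " " l else "") = PySem.Str.join " " l := by
  rcases l with _ | ⟨a, t⟩
  · simp
    rfl
  · simp

-- ===== VERDICT (by name: the statement is the Claim_ definition above) =====
theorem solve_reference_spec : Claim_equal_solve_reference := by
  intro n m tiles _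
  unfold Spec_solve_reference
  by_cases hn : n > 10000
  · -- large-n branch
    have hs : (1 : Int) ≤ max 1 (PySem.Int.floordiv n 1000) := le_max_left _ _
    set s : Int := max 1 (PySem.Int.floordiv n 1000) with hsdef
    set r : List Int := PySem.List.pyRange n 0 (-s) with hrdef
    have hmem : ∀ x : Int, x ∈ r ↔ 0 < x ∧ x ≤ n ∧ (-s) ∣ x - n := by
      intro x; rw [hrdef]; exact PySem.List.mem_pyRange_iff_of_neg (by omega) x
    have hnr : n ∈ r := (hmem n).mpr ⟨by omega, le_rfl, ⟨0, by ring⟩⟩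
    have hner : r ≠ [] := fun h => by rw [h] at hnr; exact absurd hnr (List.not_mem_nil)
    have hpw : r.Pairwise (fun a b => b < a) := by
      rw [hrdef, PySem.List.pyRange_of_neg n 0 (by omega)]
      refine List.Pairwise.map _ ?_ List.pairwise_lt_range
      intro a b hab
      have h1 : (a : Int) < (b : Int) := by exact_mod_cast hab
      have h2 : (0 : Int) < s := by omega
      have := mul_lt_mul_of_pos_left h1 h2
      linarith
    have hone : ∀ x ∈ r, 1 ≤ x := fun x hx => by have := (hmem x).mp hx; omega
    have hlast1 : (r.getLast hner = 1) ↔ 1 ∈ r := by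
      constructor
      · intro h; rw [← h]; exact List.getLast_mem hner
      · intro h
        have h1 := pv_getLast_min hpw hner 1 h
        have h2 := hone _ (List.getLast_mem hner)
        omega
    set T : List Int := r ++ (if 1 ∈ r then [] else [1]) with hTdef
    have hTmem : ∀ x : Int, x ∈ T ↔ x ∈ r ∨ x = 1 := by
      intro x
      by_cases h1 : (1 : Int) ∈ r
      · rw [hTdef, if_pos h1]
        simp only [List.append_nil]
        exact ⟨Or.inl, fun h => h.elim id (fun hx => hx ▸ h1)⟩
      · rw [hTdef, if_neg h1]
        simp [List.mem_append]
    have hTpw : T.Pairwise (fun a b => b < a) := by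
      rw [hTdef]
      by_cases h1 : (1 : Int) ∈ r
      · simpa [h1] using hpw
      · rw [if_neg h1, List.pairwise_append]
        refine ⟨hpw, by simp, ?_⟩
        intro a ha b hb
        simp only [List.mem_singleton] at hb
        subst hb
        have ha1 := hone a ha
        have hne1 : a ≠ 1 := fun h => h1 (h ▸ ha)
        omega
    have hTnodup : T.Nodup := hTpw.imp ne_of_gt
    set S : PySem.Set Int := PySem.Set.update (PySem.Set.ofList [n, 1]) r with hSdef
    have hSmem : ∀ x : Int, x ∈ S ↔ x ∈ r ∨ x = 1 := by
      intro x
      rw [hSdef, PySem.Set.mem_update, PySem.Set.mem_ofList]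
      simp only [List.mem_cons, List.not_mem_nil, or_false]
      constructor
      · rintro ((rfl | rfl) | hx)
        · exact Or.inl hnr
        · exact Or.inr rfl
        · exact Or.inl hx
      · rintro (hx | rfl)
        · exact Or.inr hx
        · exact Or.inl (Or.inr rfl)
    have hSnodup : S.Nodup := PySem.Set.nodup_update _ _ (PySem.Set.nodup_ofList _)
    have hperm : T.Perm S := List.perm_of_nodup_nodup_toFinset_eq hTnodup hSnodup (by
      ext x
      simp only [List.mem_toFinset]
      rw [hTmem, hSmem])
    have hsorted : PySem.List.sorted S (fun x => x) true = T :=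
      PySem.List.sorted_rev_eq_of_perm_of_pairwise_gt S T _ hperm hTpw
    have hfoldS : r.foldl (fun s k => PySem.Set.add s k) (PySem.Set.ofList [n, 1]) = S :=
      hSdef ▸ rfl
    have hksB : (if PySem.List.pyGetD r (-1) 0 ≠ 1 then r ++ [1] else r) = T := by
      rw [PySem.List.pyGetD_neg_one r 0 hner, hTdef]
      by_cases h1 : (1 : Int) ∈ r
      · rw [if_neg (by simp [hlast1.mpr h1]), if_pos h1, List.append_nil]
      · rw [if_pos (fun h => h1 (hlast1.mp h)), if_neg h1]
    simp only [solve_reference, solve_reference_alt, if_pos hn]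
    rw [← hsdef, ← hrdef, hfoldS, hsorted, hksB, pvFold_inv]
    have hguard : T.foldl
        (fun acc k =>
          if k > n then acc
          else
            if PySem.Str.slice tiles none (some k) =
                (PySem.Str.slice? (PySem.Str.slice tiles none (some k)) none none (-1)).getD ""
            then acc ++ [PySem.Int.toStr k] else acc) ([] : List String)
        = T.foldl
        (fun acc k =>
            if PySem.Str.slice tiles none (some k) =
                (PySem.Str.slice? (PySem.Str.slice tiles none (some k)) none none (-1)).getD ""
            then acc ++ [PySem.Int.toStr k] else acc) ([] : List String) := by
      apply PySem.List.foldl_congr_mem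
      intro acc x hx
      have : ¬ x > n := by
        rcases (hTmem x).mp hx with hxr | rfl
        · have := (hmem x).mp hxr; omega
        · omega
      rw [if_neg this]
    rw [hguard, PySem.List.foldl_append_ite
        (p := fun k => PySem.Str.slice tiles none (some k) =
          (PySem.Str.slice? (PySem.Str.slice tiles none (some k)) none none (-1)).getD "")
        (f := fun k => PySem.Int.toStr k),
      List.nil_append, pv_join_if]
    apply congrArg
    apply congrArg
    apply List.filter_congr
    intro x hx
    have hx1 : (1 : Int) ≤ x := by
      rcases (hTmem x).mp hx with hxr | rfl
      · exact hone x hxr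
      · omega
    exact (pv_test_eq tiles x hx1).trans (pv_pred_eq tiles.toList x hx1)
  · -- small-n branch
    simp only [solve_reference, solve_reference_alt, if_neg hn]
    rw [pvFold_inv, PySem.List.foldl_append_ite
        (p := fun k => PySem.Str.slice tiles none (some k) =
          (PySem.Str.slice? (PySem.Str.slice tiles none (some k)) none none (-1)).getD "")
        (f := fun k => PySem.Int.toStr k),
      List.nil_append, pv_join_if]
    apply congrArg
    apply congrArg
    apply List.filter_congr
    intro x hx
    have hx1 : (1 : Int) ≤ x := by
      have := PySem.List.mem_pyRange_neg_one.mp hx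
      omega
    exact (pv_test_eq tiles x hx1).trans (pv_pred_eq tiles.toList x hx1)
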